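-- pv_equiv track=rewrite | github.com/mclaurinpd/AdventOfCode2019 | day4.py | checkForDouble
-- ===== SOURCE A (Python) =====
-- def checkForDouble(num):
--     temp = str(num)
--     isDouble = False
--     x = 0
--     while(x < len(temp)-1):
--         if temp[x] == temp[x+1]:
--             isDouble = True
--             if x < len(temp) - 2 and temp[x] == temp[x+2]:
--                 isDouble = False
--                 while(x < len(temp) - 1 and temp[x] == temp[x+1]):
--                     x+=1
--         x+=1
--         if(isDouble):
--             return isDouble
--
--     return isDouble
-- ===== SOURCE B (Python) =====
-- def checkForDouble(num):
--     s = str(num)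
--     runs = []
--     i = 0
--     while i < len(s):
--         j = i
--         while j < len(s) and s[j] == s[i]:
--             j += 1
--         runs.append(j - i)
--         i = j
--     return 2 in runs
-- ===== Notes on version B (the rewrite author's own statement) =====
-- stated objective: idiomatic
-- what changed: B decomposes str(num) into its maximal run lengths with a simple two-level scan and then just tests '2 in runs', replacing A's stateful index walk with isDouble flag, early return and mid-loop run-skipping.
import Mathlib
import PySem

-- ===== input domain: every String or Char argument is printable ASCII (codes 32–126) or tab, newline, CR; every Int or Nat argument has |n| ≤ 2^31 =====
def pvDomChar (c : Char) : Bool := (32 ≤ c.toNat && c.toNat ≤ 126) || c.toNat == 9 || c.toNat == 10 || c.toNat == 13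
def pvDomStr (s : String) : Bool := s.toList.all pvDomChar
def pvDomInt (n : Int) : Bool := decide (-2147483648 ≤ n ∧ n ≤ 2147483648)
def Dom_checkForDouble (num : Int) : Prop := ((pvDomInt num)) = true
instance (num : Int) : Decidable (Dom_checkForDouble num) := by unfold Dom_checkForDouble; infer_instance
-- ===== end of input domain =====

-- B replaces A's index scan with inner skip loop and early return by an explicit
-- run-length decomposition followed by a membership test (objective: idiomatic).

-- ===== PORT A =====
-- inner while loop of A: advance x while x < len-1 and temp[x] == temp[x+1]
-- (all indexing in A is guarded in range by the loop conditions, so List.getD is exact here)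
def skipA (s : List Char) (x : Nat) : Nat :=
  if h : x < s.length - 1 ∧ s.getD x ' ' = s.getD (x+1) ' ' then skipA s (x+1) else x
termination_by s.length - x
decreasing_by omega

lemma skipA_ge (s : List Char) (x : Nat) : x ≤ skipA s x := by
  unfold skipA
  split
  · exact Nat.le_trans (Nat.le_succ x) (skipA_ge s (x+1))
  · exact Nat.le_refl x
termination_by s.length - x
decreasing_by omega

-- outer while loop of A; isDouble is eliminated: whenever A sets it and reaches
-- 'if isDouble: return' it returns True, otherwise it stays False
def loopA (s : List Char) (x : Nat) : Bool :=
  if h : x < s.length - 1 then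
    if s.getD x ' ' = s.getD (x+1) ' ' then
      if x < s.length - 2 ∧ s.getD x ' ' = s.getD (x+2) ' ' then
        loopA s (skipA s x + 1)
      else true
    else loopA s (x+1)
  else false
termination_by s.length - x
decreasing_by
  · have := skipA_ge s x; omega
  · omega

def checkForDouble (num : Int) : Bool :=
  loopA (PySem.Int.toStr num).toList 0

-- ===== PORT B =====
-- inner while loop of B: j advances while j < len(s) and s[j] == s[i]
def scanB (s : List Char) (i j : Nat) : Nat :=
  if h : j < s.length ∧ s.getD j ' ' = s.getD i ' ' then scanB s i (j+1) else j
termination_by s.length - j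
decreasing_by omega

lemma scanB_ge (s : List Char) (i j : Nat) : j ≤ scanB s i j := by
  unfold scanB
  split
  · exact Nat.le_trans (Nat.le_succ j) (scanB_ge s i (j+1))
  · exact Nat.le_refl j
termination_by s.length - j
decreasing_by omega

-- outer while loop of B: collect the run lengths (j - i), then move i to j
def runsB (s : List Char) (i : Nat) : List Nat :=
  if h : i < s.length then
    let j := scanB s i i
    (j - i) :: runsB s j
  else []
termination_by s.length - i
decreasing_by
  have h1 : i + 1 ≤ scanB s i i := by
    conv_rhs => rw [scanB]
    rw [dif_pos ⟨h, rfl⟩]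
    exact scanB_ge s i (i+1)
  omega

def checkForDouble_alt (num : Int) : Bool :=
  (runsB (PySem.Int.toStr num).toList 0).contains 2

-- ===== PRECONDITION & SPEC =====
def Spec_checkForDouble (num : Int) (out : Bool) : Prop := out = checkForDouble_alt num
instance (num : Int) (out : Bool) : Decidable (Spec_checkForDouble num out) := by unfold Spec_checkForDouble; infer_instance

-- ===== CLAIM (what is proved, stated in full; the proofs are below) =====
def Claim_equal_checkForDouble : Prop := ∀ (num : Int), Dom_checkForDouble num → Spec_checkForDouble num (checkForDouble num)

-- ===== LEMMAS AND PROOFS =====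

-- B's inner scan ends one past the index where A's inner skip ends
lemma scan_eq_skip (s : List Char) :
    ∀ n x i, s.length - x ≤ n → x < s.length → s.getD x ' ' = s.getD i ' ' →
      scanB s i x = skipA s x + 1 := by
  intro n
  induction n with
  | zero => intro x i hn hx _; omega
  | succ n ih =>
    intro x i hn hx heq
    rw [scanB, dif_pos ⟨hx, heq⟩, skipA]
    by_cases hc : x < s.length - 1 ∧ s.getD x ' ' = s.getD (x+1) ' '
    · rw [dif_pos hc]
      exact ih (x+1) i (by omega) (by omega) (hc.2.symm.trans heq)
    · rw [dif_neg hc]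
      rw [scanB]
      rw [dif_neg]
      intro ⟨h1, h2⟩
      exact hc ⟨by omega, heq.trans h2.symm⟩

lemma loopA_eq_runsB (s : List Char) :
    ∀ n x, s.length - x ≤ n → loopA s x = (runsB s x).contains 2 := by
  intro n
  induction n with
  | zero =>
    intro x hn
    rw [loopA, dif_neg (by omega), runsB, dif_neg (by omega)]
    rfl
  | succ n ih =>
    intro x hn
    by_cases hx : x < s.length
    · rw [runsB, dif_pos hx]
      have hscan : scanB s x x = skipA s x + 1 :=
        scan_eq_skip s (n+1) x x hn hx rfl
      by_cases hx1 : x < s.length - 1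
      · rw [loopA, dif_pos hx1]
        by_cases hab : s.getD x ' ' = s.getD (x+1) ' '
        · rw [if_pos hab]
          have hskip1 : skipA s x = skipA s (x+1) := by
            rw [skipA, dif_pos ⟨hx1, hab⟩]
          by_cases htr : x < s.length - 2 ∧ s.getD x ' ' = s.getD (x+2) ' '
          · rw [if_pos htr]
            -- the run has length ≥ 3: skipA s x ≥ x + 2
            have hskip2 : x + 2 ≤ skipA s x := by
              rw [hskip1, skipA, dif_pos ⟨by omega, hab.symm.trans htr.2⟩]
              exact skipA_ge s (x+2)
            simp only [List.contains_cons, hscan]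
            rw [ih (skipA s x + 1) (by omega)]
            have h2 : (2 == skipA s x + 1 - x) = false := by
              simp only [beq_eq_false_iff_ne, ne_eq]
              omega
            simp [h2]
          · rw [if_neg htr]
            -- the run has length exactly 2: skipA s x = x + 1
            have hskip2 : skipA s (x+1) = x + 1 := by
              rw [skipA, dif_neg]
              intro ⟨h1, h2⟩
              exact htr ⟨by omega, hab.trans h2⟩
            simp only [List.contains_cons, hscan, hskip1, hskip2]
            have h2 : (2 == x + 1 + 1 - x) = true := by
              simp only [beq_iff_eq]
              omega
            simp [h2]
        · rw [if_neg hab]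
          -- run of length 1
          have hskip0 : skipA s x = x := by
            rw [skipA, dif_neg]
            intro ⟨h1, h2⟩
            exact hab h2
          simp only [List.contains_cons, hscan, hskip0]
          rw [ih (x+1) (by omega)]
          simp
      · -- x = s.length - 1 : a final run of length 1
        rw [loopA, dif_neg hx1]
        have hskip0 : skipA s x = x := by
          rw [skipA, dif_neg]
          intro ⟨h1, _⟩
          omega
        have hempty : runsB s (x + 1) = [] := by
          rw [runsB, dif_neg (by omega)]
        simp only [List.contains_cons, hscan, hskip0, hempty]
        simp
    · rw [loopA, dif_neg (by omega), runsB, dif_neg hx]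
      rfl

-- ===== VERDICT (by name: the statement is the Claim_ definition above) =====
theorem checkForDouble_spec : Claim_equal_checkForDouble := by
  intro num _
  unfold Spec_checkForDouble checkForDouble checkForDouble_alt
  exact loopA_eq_runsB _ _ 0 (Nat.le_refl _)
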